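-- pv_equiv track=rewrite | github.com/calliope-pro/algorithm | templates/dp/自然数の分割数.py | q_naive
-- ===== SOURCE A (Python) =====
-- def q_naive(k: int, n: int) -> int:
--     if k == 0 and n == 0:
--         return 1
--     if k == 0:
--         return 0
--     if k > n:
--         return q_naive(n, n)
--     return q_naive(k-1, n) + q_naive(k, n-k)
-- ===== SOURCE B (Python) =====
-- def q_naive(k: int, n: int) -> int:
--     if k == 0:
--         return 1 if n == 0 else 0
--     ways = [1] + [0] * n
--     for part in range(1, min(k, n) + 1):
--         for i in range(part, n + 1):
--             ways[i] += ways[i - part]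
--     return ways[n]
-- ===== Notes on version B (the rewrite author's own statement) =====
-- stated objective: faster
-- what changed: Replaced the exponential two-branch recursion by a bottom-up 1D DP table over target sums, adding one part size at a time.
import Mathlib
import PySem

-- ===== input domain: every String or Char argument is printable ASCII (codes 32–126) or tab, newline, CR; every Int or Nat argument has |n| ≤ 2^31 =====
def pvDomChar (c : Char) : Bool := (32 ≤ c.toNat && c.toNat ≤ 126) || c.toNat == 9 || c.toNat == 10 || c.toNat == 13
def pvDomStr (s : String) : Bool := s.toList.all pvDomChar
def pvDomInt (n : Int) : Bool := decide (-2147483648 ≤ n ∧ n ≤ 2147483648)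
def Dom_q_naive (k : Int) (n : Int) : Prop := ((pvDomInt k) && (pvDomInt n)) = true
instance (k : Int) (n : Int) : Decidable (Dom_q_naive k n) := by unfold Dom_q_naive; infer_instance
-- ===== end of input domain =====

-- B replaces A's exponential two-branch recursion by a bottom-up O(k*n) DP table over target sums.

-- ===== PORT A =====
-- A is a plain recursion that diverges for negative inputs; the fuel argument is
-- only a totality guard: with fuel > k.toNat + n.toNat every recursive call is reached.
def q_naiveF : Nat → Int → Int → Int
  | 0, _, _ => 0
  | f + 1, k, n =>
    if k = 0 ∧ n = 0 then 1
    else if k = 0 then 0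
    else if k > n then q_naiveF f n n
    else q_naiveF f (k - 1) n + q_naiveF f k (n - k)

def q_naive (k : Int) (n : Int) : Int :=
  q_naiveF (if k < 0 ∨ (0 < k ∧ n < 0) then 0 else k.toNat + n.toNat + 1) k n

-- ===== PORT B =====
-- the Python list 'ways' is array-backed: Array Int with O(1) get/set is the faithful carrier
def q_naive_alt (k : Int) (n : Int) : Int :=
  if k = 0 then (if n = 0 then 1 else 0) else
  (PySem.List.pyGet?
    ((PySem.List.pyRange 1 (min k n + 1) 1).foldl (fun (w : Array Int) part =>
      (PySem.List.pyRange part (n + 1) 1).foldl (fun (w : Array Int) i =>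
        w.set! i.toNat (w[i.toNat]! + w[(i - part).toNat]!)) w)
      (#[(1 : Int)] ++ Array.replicate n.toNat 0)).toList n).getD 0

-- ===== PRECONDITION & SPEC =====
-- Pre_ excludes exactly the inputs on which A recurses forever (RecursionError):
-- k < 0, or k > 0 with n < 0. (k = 0 with n < 0 returns and stays inside Pre_.)
def Pre_q_naive (k : Int) (n : Int) : Prop := (0 ≤ k ∧ 0 ≤ n) ∨ (k = 0 ∧ n < 0)
instance (k : Int) (n : Int) : Decidable (Pre_q_naive k n) := by unfold Pre_q_naive; infer_instance
def pvWitness_q_naive : Int × Int := (3, 5)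

def Spec_q_naive (k : Int) (n : Int) (out : Int) : Prop := out = q_naive_alt k n
instance (k : Int) (n : Int) (out : Int) : Decidable (Spec_q_naive k n out) := by unfold Spec_q_naive; infer_instance

-- ===== CLAIM (what is proved, stated in full; the proofs are below) =====
def Claim_equal_q_naive : Prop := ∀ (k : Int) (n : Int), Dom_q_naive k n → Pre_q_naive k n → Spec_q_naive k n (q_naive k n)

-- ===== LEMMAS AND PROOFS =====

-- Mathematical reference: number of partitions of n into parts ≤ k.
def P : Nat → Nat → Int
  | k, n =>
    if k = 0 ∧ n = 0 then 1
    else if k = 0 then 0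
    else if h : n < k then P n n
    else P (k - 1) n + P k (n - k)
termination_by k n => (n, k)
decreasing_by
  · exact Prod.Lex.right n h
  · exact Prod.Lex.right n (by omega)
  · exact Prod.Lex.left _ _ (by omega)

lemma P_zero (n : Nat) : P 0 n = if n = 0 then 1 else 0 := by
  rw [P]
  by_cases h : n = 0 <;> simp [h]

lemma P_lt {p i : Nat} (h : i < p) : P p i = P i i := by
  rw [P, if_neg (by omega : ¬(p = 0 ∧ i = 0)), if_neg (by omega : ¬ p = 0), dif_pos h]

lemma P_eq_of_lt {p i : Nat} (h : i < p) : P p i = P (p - 1) i := by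
  rcases Nat.lt_or_ge i (p - 1) with h' | h'
  · rw [P_lt h, P_lt h']
  · have hi : i = p - 1 := by omega
    subst hi
    rw [P_lt h]

lemma P_rec {p i : Nat} (hp : 1 ≤ p) (hpi : p ≤ i) : P p i = P (p - 1) i + P p (i - p) := by
  conv_lhs => rw [P]
  rw [if_neg (by omega : ¬(p = 0 ∧ i = 0)), if_neg (by omega : ¬ p = 0),
    dif_neg (by omega : ¬ i < p)]

-- ===== A side =====
lemma qF_eq : ∀ (f : Nat) (k n : Int), 0 ≤ k → 0 ≤ n → k.toNat + n.toNat < f →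
    q_naiveF f k n = P k.toNat n.toNat := by
  intro f
  induction f with
  | zero => intro k n hk hn hf; omega
  | succ f ih =>
    intro k n hk hn hf
    rw [q_naiveF]
    by_cases h1 : k = 0 ∧ n = 0
    · rw [if_pos h1, h1.1, h1.2]
      simp [P_zero]
    · rw [if_neg h1]
      by_cases h2 : k = 0
      · have hn0 : n ≠ 0 := fun h => h1 ⟨h2, h⟩
        rw [if_pos h2, h2]
        simp only [Int.toNat_zero]
        rw [P_zero, if_neg (by omega)]
      · rw [if_neg h2]
        by_cases h3 : k > n
        · rw [if_pos h3]
          have hfn : n.toNat + n.toNat < f := by omega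
          rw [ih n n hn hn hfn]
          exact (P_lt (by omega)).symm
        · rw [if_neg h3]
          have hf1 : (k - 1).toNat + n.toNat < f := by omega
          have hf2 : k.toNat + (n - k).toNat < f := by omega
          rw [ih (k - 1) n (by omega) hn hf1, ih k (n - k) hk (by omega) hf2]
          have e1 : (k - 1).toNat = k.toNat - 1 := by omega
          have e2 : (n - k).toNat = n.toNat - k.toNat := by omega
          rw [e1, e2]
          exact (P_rec (by omega) (by omega)).symm

-- ===== B side =====
lemma getD_set_self {w : List Int} {j : Nat} (h : j < w.length) (v : Int) :
    (w.set j v).getD j 0 = v := by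
  simp [List.getD, h]

lemma getD_set_ne {w : List Int} {j i : Nat} (h : i ≠ j) (v : Int) :
    (w.set j v).getD i 0 = w.getD i 0 := by
  simp [List.getD, List.getElem?_set_ne (Ne.symm h)]

-- inner loop: adding one part size p over targets j..n
lemma inner_loop : ∀ (d p j n : Nat) (w : List Int), 1 ≤ p → p ≤ j → n + 1 - j ≤ d →
    w.length = n + 1 →
    (∀ i, i ≤ n → w.getD i 0 = if i < j then P p i else P (p - 1) i) →
    ((PySem.List.pyRange (j : Int) ((n : Int) + 1) 1).foldl (fun w i =>
        w.set i.toNat (w.getD i.toNat 0 + w.getD (i - (p : Int)).toNat 0)) w).length = n + 1 ∧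
    ∀ i, i ≤ n →
      ((PySem.List.pyRange (j : Int) ((n : Int) + 1) 1).foldl (fun w i =>
        w.set i.toNat (w.getD i.toNat 0 + w.getD (i - (p : Int)).toNat 0)) w).getD i 0 = P p i := by
  intro d
  induction d with
  | zero =>
    intro p j n w hp hpj hd hlen hinv
    rw [PySem.List.pyRange_one_eq_nil (by omega)]
    simp only [List.foldl_nil]
    exact ⟨hlen, fun i hi => by rw [hinv i hi, if_pos (by omega)]⟩
  | succ d ih =>
    intro p j n w hp hpj hd hlen hinv
    rcases Nat.lt_or_ge n j with hj | hj
    · rw [PySem.List.pyRange_one_eq_nil (by omega)]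
      simp only [List.foldl_nil]
      exact ⟨hlen, fun i hi => by rw [hinv i hi, if_pos (by omega)]⟩
    · rw [PySem.List.pyRange_one_cons (by omega : (j : Int) < (n : Int) + 1)]
      simp only [List.foldl_cons]
      have e1 : ((j : Int)).toNat = j := by omega
      have e2 : ((j : Int) - (p : Int)).toNat = j - p := by omega
      have e3 : ((j : Int) + 1) = ((j + 1 : Nat) : Int) := by push_cast; ring
      rw [e1, e2, e3]
      have hlen' : (w.set j (w.getD j 0 + w.getD (j - p) 0)).length = n + 1 := by
        rw [List.length_set, hlen]
      have hinv' : ∀ i, i ≤ n →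
          (w.set j (w.getD j 0 + w.getD (j - p) 0)).getD i 0 =
            if i < j + 1 then P p i else P (p - 1) i := by
        intro i hi
        by_cases hij : i = j
        · subst hij
          rw [getD_set_self (by omega), if_pos (by omega)]
          rw [hinv i (by omega), if_neg (by omega)]
          rw [hinv (i - p) (by omega), if_pos (by omega)]
          exact (P_rec hp (by omega)).symm
        · rw [getD_set_ne hij, hinv i hi]
          by_cases h' : i < j + 1
          · rw [if_pos h', if_pos (by omega)]
          · rw [if_neg h', if_neg (by omega)]
      exact ih p (j + 1) n _ hp (by omega) (by omega) hlen' hinv'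

-- outer loop: parts a..M
lemma outer_loop : ∀ (d : Nat) (n a M : Nat) (w : List Int), 1 ≤ a → a ≤ M + 1 → M ≤ n →
    M + 1 - a ≤ d → w.length = n + 1 →
    (∀ i, i ≤ n → w.getD i 0 = P (a - 1) i) →
    ((PySem.List.pyRange (a : Int) ((M : Int) + 1) 1).foldl (fun w part =>
        (PySem.List.pyRange part ((n : Int) + 1) 1).foldl (fun w i =>
          w.set i.toNat (w.getD i.toNat 0 + w.getD (i - part).toNat 0)) w) w).length = n + 1 ∧
    ∀ i, i ≤ n →
      ((PySem.List.pyRange (a : Int) ((M : Int) + 1) 1).foldl (fun w part =>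
        (PySem.List.pyRange part ((n : Int) + 1) 1).foldl (fun w i =>
          w.set i.toNat (w.getD i.toNat 0 + w.getD (i - part).toNat 0)) w) w).getD i 0 = P M i := by
  intro d
  induction d with
  | zero =>
    intro n a M w ha haM hMn hd hlen hinv
    have : a = M + 1 := by omega
    subst this
    rw [PySem.List.pyRange_one_eq_nil (by push_cast; omega)]
    simp only [List.foldl_nil]
    exact ⟨hlen, fun i hi => by rw [hinv i hi]; norm_num⟩
  | succ d ih =>
    intro n a M w ha haM hMn hd hlen hinv
    rcases Nat.lt_or_ge M a with hMa | hMa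
    · have : a = M + 1 := by omega
      subst this
      rw [PySem.List.pyRange_one_eq_nil (by push_cast; omega)]
      simp only [List.foldl_nil]
      exact ⟨hlen, fun i hi => by rw [hinv i hi]; norm_num⟩
    · rw [PySem.List.pyRange_one_cons (by push_cast; omega)]
      simp only [List.foldl_cons]
      have hstart : ∀ i, i ≤ n → w.getD i 0 = if i < a then P a i else P (a - 1) i := by
        intro i hi
        rw [hinv i hi]
        split_ifs with h
        · exact (P_eq_of_lt h).symm
        · rfl
      have hin := inner_loop (n + 1) a a n w ha (le_refl a) (by omega) hlen hstart
      have e3 : ((a : Int) + 1) = ((a + 1 : Nat) : Int) := by push_cast; ring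
      rw [e3]
      have hinv' : ∀ i, i ≤ n →
          ((PySem.List.pyRange (a : Int) ((n : Int) + 1) 1).foldl (fun w i =>
            w.set i.toNat (w.getD i.toNat 0 + w.getD (i - (a : Int)).toNat 0)) w).getD i 0 =
            P (a + 1 - 1) i := by
        intro i hi
        rw [hin.2 i hi]
        norm_num
      exact ih n (a + 1) M _ (by omega) (by omega) hMn (by omega) hin.1 hinv'

lemma arr_set (w : Array Int) (i : Nat) (v : Int) :
    (w.set! i v).toList = w.toList.set i v := by
  simp [Array.set!]

lemma arr_get (w : Array Int) (i : Nat) : w[i]! = w.toList.getD i 0 := by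
  rw [List.getD_eq_getElem?_getD, getElem!_def]
  rcases Nat.lt_or_ge i w.size with h | h
  · rw [List.getElem?_eq_getElem (by simpa using h), getElem?_def, dif_pos h]
    simp
  · rw [List.getElem?_eq_none (by simpa using h), getElem?_def, dif_neg (by omega)]
    rfl

lemma fold_inner_toList (p : Int) (r : List Int) (w : Array Int) :
    (r.foldl (fun w i => w.set! i.toNat (w[i.toNat]! + w[(i - p).toNat]!)) w).toList =
    r.foldl (fun w i => w.set i.toNat (w.getD i.toNat 0 + w.getD (i - p).toNat 0)) w.toList := by
  induction r generalizing w with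
  | nil => rfl
  | cons x r ih =>
    simp only [List.foldl_cons]
    rw [ih, arr_set, arr_get, arr_get]

lemma fold_outer_toList (n : Int) (r : List Int) (w : Array Int) :
    (r.foldl (fun w part =>
      (PySem.List.pyRange part (n + 1) 1).foldl (fun w i =>
        w.set! i.toNat (w[i.toNat]! + w[(i - part).toNat]!)) w) w).toList =
    r.foldl (fun w part =>
      (PySem.List.pyRange part (n + 1) 1).foldl (fun w i =>
        w.set i.toNat (w.getD i.toNat 0 + w.getD (i - part).toNat 0)) w) w.toList := by
  induction r generalizing w with
  | nil => rfl
  | cons x r ih =>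
    simp only [List.foldl_cons]
    rw [ih, fold_inner_toList]

lemma alt_eq (k n : Int) (hk : 0 ≤ k) (hn : 0 ≤ n) :
    q_naive_alt k n = P k.toNat n.toNat := by
  obtain ⟨N, rfl⟩ : ∃ N : Nat, n = (N : Int) := ⟨n.toNat, by omega⟩
  obtain ⟨K, rfl⟩ : ∃ K : Nat, k = (K : Int) := ⟨k.toNat, by omega⟩
  unfold q_naive_alt
  by_cases hK0 : (K : Int) = 0
  · rw [if_pos hK0]
    have : K = 0 := by omega
    subst this
    simp only [Int.toNat_natCast, P_zero]
    by_cases hN0 : N = 0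
    · subst hN0; simp
    · rw [if_neg (by omega : ¬ (N : Int) = 0), if_neg hN0]
  rw [if_neg hK0]
  rw [fold_outer_toList]
  have etl : (#[(1 : Int)] ++ Array.replicate ((N : Int)).toNat 0).toList
      = [(1 : Int)] ++ List.replicate ((N : Int)).toNat 0 := by simp
  rw [etl]
  have hmin : min (K : Int) (N : Int) + 1 = ((min K N : Nat) : Int) + 1 := by
    push_cast; omega
  rw [hmin]
  have hNt : ((N : Int)).toNat = N := by omega
  have hKt : ((K : Int)).toNat = K := by omega
  rw [hNt, hKt]
  have hinit : ([ (1:Int) ] ++ List.replicate N 0).length = N + 1 := by simp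
  have hinv : ∀ i, i ≤ N → ([ (1:Int) ] ++ List.replicate N 0).getD i 0 = P 0 i := by
    intro i hi
    rw [P_zero]
    cases i with
    | zero => simp
    | succ m =>
      rw [if_neg (by omega)]
      simp only [List.getD, List.cons_append, List.nil_append, List.getElem?_cons_succ,
        List.getElem?_replicate]
      split_ifs <;> rfl
  have hout := outer_loop (min K N + 1) N 1 (min K N) ([ (1:Int) ] ++ List.replicate N 0)
    (le_refl 1) (by omega) (by omega) (by omega) hinit hinv
  rw [(by norm_num : ((1 : Nat) : Int) = (1 : Int))] at hout
  rw [PySem.List.pyGet?_natCast, ← List.getD_eq_getElem?_getD, hout.2 N (le_refl N)]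
  by_cases h : K ≤ N
  · rw [min_eq_left h]
  · rw [min_eq_right (by omega : N ≤ K)]
    exact (P_lt (by omega : N < K)).symm

-- ===== VERDICT (by name: the statement is the Claim_ definition above) =====
theorem q_naive_spec : Claim_equal_q_naive := by
  intro k n _ hpre
  rcases hpre with ⟨hk, hn⟩ | ⟨hk, hn⟩
  · unfold Spec_q_naive q_naive
    rw [if_neg (by omega : ¬ (k < 0 ∨ (0 < k ∧ n < 0)))]
    rw [qF_eq _ k n hk hn (by omega), alt_eq k n hk hn]
  · subst hk
    unfold Spec_q_naive q_naive q_naive_alt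
    rw [if_neg (by omega : ¬ ((0:Int) < 0 ∨ (0 < (0:Int) ∧ n < 0)))]
    rw [q_naiveF, if_neg (by omega : ¬ ((0:Int) = 0 ∧ n = 0)), if_pos rfl,
      if_pos rfl, if_neg (by omega : ¬ n = 0)]
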